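-- pv_equiv track=rewrite | github.com/Andrei1999/text_detect | main.py | answer_column
-- ===== SOURCE A (Python) =====
-- def answer_column(letters):
--     answer = []
--     k = 100
--     if (len(letters) > 0):
--         for i in range(letters[-1][3] // 100 + 1):
--             ans = []
--             for j in range(len(letters)):
--                 if ((k * i) <= letters[j][3] <= (k * (i + 1))):
--                     ans.append(letters[j])
--                 ans.sort(key=lambda x: x[0], reverse=False)
--             answer.append(ans)
--     return answer
-- ===== SOURCE B (Python) =====
-- def answer_column(letters):
--     # One-pass bucketing: each letter lands in its 1 or 2 buckets directly,
--     # then every bucket is sorted once.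
--     if not letters:
--         return []
--     nb = letters[-1][3] // 100 + 1
--     buckets = [[] for _ in range(nb)]
--     for t in letters:
--         q, r = divmod(t[3], 100)
--         for i in ((q - 1, q) if r == 0 else (q,)):
--             if 0 <= i < nb:
--                 buckets[i].append(t)
--     return [sorted(b, key=lambda x: x[0]) for b in buckets]
-- ===== Notes on version B (the rewrite author's own statement) =====
-- stated objective: alternative
-- what changed: A rescans the whole letter list for every bucket and re-sorts the growing bucket after every single scan step; B makes one pass over the letters dropping each into its one or two buckets (divmod by 100), then sorts each bucket once.
import Mathlib
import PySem

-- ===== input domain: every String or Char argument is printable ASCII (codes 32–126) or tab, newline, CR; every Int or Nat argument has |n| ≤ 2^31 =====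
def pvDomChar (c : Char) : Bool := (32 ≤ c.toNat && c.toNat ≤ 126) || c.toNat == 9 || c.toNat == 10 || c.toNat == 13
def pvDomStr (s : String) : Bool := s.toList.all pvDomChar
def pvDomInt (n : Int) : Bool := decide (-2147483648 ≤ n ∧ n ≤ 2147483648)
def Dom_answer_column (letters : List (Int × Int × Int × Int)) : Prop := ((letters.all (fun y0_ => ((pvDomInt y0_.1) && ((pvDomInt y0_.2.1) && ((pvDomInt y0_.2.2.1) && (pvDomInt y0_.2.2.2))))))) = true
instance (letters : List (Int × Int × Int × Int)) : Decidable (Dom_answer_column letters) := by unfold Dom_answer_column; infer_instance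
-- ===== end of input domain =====

-- B replaces A's per-bucket rescan with repeated re-sorting by a single pass that drops each
-- letter into its one or two buckets, each sorted once at the end (objective: alternative).

-- ===== PORT A =====
def answer_column (letters : List (Int × Int × Int × Int)) : List (List (Int × Int × Int × Int)) :=
  let k : Int := 100
  if letters.length > 0 then
    (PySem.List.pyRange 0
        (PySem.Int.floordiv (PySem.List.pyGetD letters (-1) (0, 0, 0, 0)).2.2.2 100 + 1) 1).foldl
      (fun answer i =>
        answer ++ [(PySem.List.pyRange 0 (PySem.List.len letters) 1).foldl
          (fun ans j =>
            let ans' := if k * i ≤ (PySem.List.pyGetD letters j (0, 0, 0, 0)).2.2.2 ∧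
                           (PySem.List.pyGetD letters j (0, 0, 0, 0)).2.2.2 ≤ k * (i + 1)
                        then ans ++ [PySem.List.pyGetD letters j (0, 0, 0, 0)] else ans
            PySem.List.sorted ans' (fun x => x.1) false) []])
      []
  else []

-- ===== PORT B =====
-- `buckets[i].append(t)` guarded by `0 <= i < nb` (the body of B's inner index loop)
def bupd (nb : Int) (t : Int × Int × Int × Int)
    (bs : List (List (Int × Int × Int × Int))) (i : Int) : List (List (Int × Int × Int × Int)) :=
  if 0 ≤ i ∧ i < nb then bs.set i.toNat (bs.getD i.toNat [] ++ [t]) else bs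

-- the body of B's main loop: drop letter t into its bucket(s)
def bstep (nb : Int) (bs : List (List (Int × Int × Int × Int)))
    (t : Int × Int × Int × Int) : List (List (Int × Int × Int × Int)) :=
  let q := PySem.Int.floordiv t.2.2.2 100
  let r := PySem.Int.mod t.2.2.2 100
  (if r = 0 then [q - 1, q] else [q]).foldl (bupd nb t) bs

def answer_column_alt (letters : List (Int × Int × Int × Int)) : List (List (Int × Int × Int × Int)) :=
  match letters with
  | [] => []
  | _ :: _ =>
    let nb : Int := PySem.Int.floordiv (PySem.List.pyGetD letters (-1) (0, 0, 0, 0)).2.2.2 100 + 1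
    let buckets := letters.foldl (bstep nb) (List.replicate nb.toNat [])
    buckets.map (fun b => PySem.List.sorted b (fun x => x.1) false)

-- ===== PRECONDITION & SPEC =====
def Spec_answer_column (letters : List (Int × Int × Int × Int)) (out : List (List (Int × Int × Int × Int))) : Prop := out = answer_column_alt letters
instance (letters : List (Int × Int × Int × Int)) (out : List (List (Int × Int × Int × Int))) : Decidable (Spec_answer_column letters out) := by unfold Spec_answer_column; infer_instance

-- ===== CLAIM (what is proved, stated in full; the proofs are below) =====
def Claim_equal_answer_column : Prop := ∀ (letters : List (Int × Int × Int × Int)), Dom_answer_column letters → Spec_answer_column letters (answer_column letters)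

-- ===== LEMMAS AND PROOFS =====

-- membership condition of bucket i (A's inner-loop test)
def bcond (i : Int) (t : Int × Int × Int × Int) : Bool :=
  decide (100 * i ≤ t.2.2.2 ∧ t.2.2.2 ≤ 100 * (i + 1))

theorem sorted_append_one (acc : List (Int × Int × Int × Int)) (x : Int × Int × Int × Int) :
    PySem.List.sorted (PySem.List.sorted acc (fun y => y.1) false ++ [x]) (fun y => y.1) false
      = PySem.List.sorted (acc ++ [x]) (fun y => y.1) false := by
  have h1 : ∀ ys : List (Int × Int × Int × Int),
      PySem.List.sorted (ys ++ [x]) (fun y => y.1) false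
        = PySem.List.insertBy (fun a b => decide (a.1 < b.1)) x
            (PySem.List.sorted ys (fun y => y.1) false) := by
    intro ys
    rw [PySem.List.sorted_eq_foldl_insertBy, PySem.List.sorted_eq_foldl_insertBy,
      List.foldl_append]
    rfl
  rw [h1, h1, PySem.List.sorted_sorted]

theorem inner_fold (i : Int) (xs acc : List (Int × Int × Int × Int)) :
    xs.foldl
        (fun ans t =>
          PySem.List.sorted
            (if 100 * i ≤ t.2.2.2 ∧ t.2.2.2 ≤ 100 * (i + 1) then ans ++ [t] else ans)
            (fun x => x.1) false)
        (PySem.List.sorted acc (fun x => x.1) false)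
      = PySem.List.sorted (acc ++ xs.filter (fun t => bcond i t)) (fun x => x.1) false := by
  induction xs generalizing acc with
  | nil => simp
  | cons x xs ih =>
    simp only [List.foldl_cons, List.filter_cons]
    by_cases h : 100 * i ≤ x.2.2.2 ∧ x.2.2.2 ≤ 100 * (i + 1)
    · have hb : bcond i x = true := by simp [bcond, h]
      rw [if_pos h, sorted_append_one, ih (acc ++ [x]), hb]
      simp
    · have hb : bcond i x = false := by simp [bcond]; omega
      rw [if_neg h, PySem.List.sorted_sorted, ih acc, hb]
      simp

theorem bupd_map (nb : Int) (t : Int × Int × Int × Int)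
    (G : Nat → List (Int × Int × Int × Int)) (i : Int) :
    bupd nb t ((List.range nb.toNat).map G) i
      = (List.range nb.toNat).map
          (fun (k : Nat) => if (0 ≤ i ∧ i < nb) ∧ (k : Int) = i then G k ++ [t] else G k) := by
  unfold bupd
  split_ifs with h
  · apply List.ext_getElem
    · simp
    · intro k h1 h2
      have hki : i.toNat < ((List.range nb.toNat).map G).length := by
        simp; omega
      have hk' : k < nb.toNat := by simpa using h2
      rw [List.getElem_set]
      simp only [List.getElem_map, List.getElem_range]
      have hget : ((List.range nb.toNat).map G).getD i.toNat [] = G i.toNat := by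
        rw [List.getD_eq_getElem _ _ hki, List.getElem_map, List.getElem_range]
      rw [hget]
      by_cases hk : i.toNat = k
      · have : (k : Int) = i := by omega
        simp [hk, h, this]
      · have : ¬ ((k : Int) = i) := by omega
        simp [hk, h, this]
  · have : ∀ k ∈ List.range nb.toNat,
        (if (0 ≤ i ∧ i < nb) ∧ (k : Int) = i then G k ++ [t] else G k) = G k := by
      intro k _
      simp [h]
    rw [List.map_congr_left this]

theorem bstep_map (nb : Int) (G : Nat → List (Int × Int × Int × Int))
    (t : Int × Int × Int × Int) :
    bstep nb ((List.range nb.toNat).map G) t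
      = (List.range nb.toNat).map
          (fun (k : Nat) => G k ++ (if bcond (k : Int) t then [t] else [])) := by
  have hy := PySem.Int.floordiv_mul_add_mod t.2.2.2 100
  have hr0 : 0 ≤ PySem.Int.mod t.2.2.2 100 := PySem.Int.mod_nonneg _ (by norm_num : (0:Int) < 100)
  have hr1 : PySem.Int.mod t.2.2.2 100 < 100 := PySem.Int.mod_lt _ (by norm_num : (0:Int) < 100)
  set q := PySem.Int.floordiv t.2.2.2 100 with hq
  set r := PySem.Int.mod t.2.2.2 100 with hrdef
  unfold bstep
  rw [← hq, ← hrdef]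
  by_cases hr : r = 0
  · simp only [if_pos hr, List.foldl_cons, List.foldl_nil]
    rw [bupd_map, bupd_map]
    apply List.map_congr_left
    intro k hk
    simp only [List.mem_range] at hk
    simp only [bcond, decide_eq_true_eq]
    split_ifs with h1 h2 h3 h4 h5 <;> first
      | rfl
      | (exfalso; omega)
      | simp
  · simp only [if_neg hr, List.foldl_cons, List.foldl_nil]
    rw [bupd_map]
    apply List.map_congr_left
    intro k hk
    simp only [List.mem_range] at hk
    simp only [bcond, decide_eq_true_eq]
    split_ifs with h1 h2 <;> first
      | rfl
      | (exfalso; omega)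
      | simp

theorem b_fold (nb : Int) (xs : List (Int × Int × Int × Int))
    (G : Nat → List (Int × Int × Int × Int)) :
    xs.foldl (bstep nb) ((List.range nb.toNat).map G)
      = (List.range nb.toNat).map (fun (k : Nat) => G k ++ xs.filter (fun t => bcond (k : Int) t)) := by
  induction xs generalizing G with
  | nil => simp
  | cons t xs ih =>
    rw [List.foldl_cons, bstep_map,
      ih (fun (k : Nat) => G k ++ (if bcond (k : Int) t then [t] else []))]
    apply List.map_congr_left
    intro k _
    by_cases h : bcond (k : Int) t <;> simp [h]

-- ===== VERDICT (by name: the statement is the Claim_ definition above) =====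
theorem answer_column_spec : Claim_equal_answer_column := by
  intro letters _
  unfold Spec_answer_column
  cases letters with
  | nil => rfl
  | cons hd tl =>
    simp only [answer_column, answer_column_alt]
    rw [if_pos (by simp)]
    set nb : Int :=
      PySem.Int.floordiv (PySem.List.pyGetD (hd :: tl) (-1) (0, 0, 0, 0)).2.2.2 100 + 1 with hnb
    -- A's outer append-loop is a map
    rw [PySem.List.foldl_append_singleton_eq_map]
    -- A's inner loop over indices is the repeated-sorting loop over the elements,
    -- which is sorting the filtered list once
    have hA : ∀ i : Int,
        List.foldl
            (fun ans j =>
              PySem.List.sorted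
                (if 100 * i ≤ (PySem.List.pyGetD (hd :: tl) j (0, 0, 0, 0)).2.2.2 ∧
                    (PySem.List.pyGetD (hd :: tl) j (0, 0, 0, 0)).2.2.2 ≤ 100 * (i + 1)
                 then ans ++ [PySem.List.pyGetD (hd :: tl) j (0, 0, 0, 0)] else ans)
                (fun x => x.1) false)
            [] (PySem.List.pyRange 0 (PySem.List.len (hd :: tl)) 1)
          = PySem.List.sorted ((hd :: tl).filter (fun t => bcond i t)) (fun x => x.1) false := by
      intro i
      refine (PySem.List.foldl_pyRange_pyGetD (hd :: tl) (0, 0, 0, 0)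
        (fun ans t =>
          PySem.List.sorted
            (if 100 * i ≤ t.2.2.2 ∧ t.2.2.2 ≤ 100 * (i + 1) then ans ++ [t] else ans)
            (fun x => x.1) false)
        [] (a := 0) (by norm_num)).trans ?_
    -- start from sorted [] = [] (definitional) and use the invariant
      exact inner_fold i (hd :: tl) []
    simp only [hA]
    -- B's buckets: the replicate is a map over the index range, then the one-pass invariant
    rw [show (List.replicate nb.toNat ([] : List (Int × Int × Int × Int)))
          = (List.range nb.toNat).map (fun _ => []) by
        rw [List.map_const', List.length_range],
      b_fold]
    rw [PySem.List.pyRange_one, List.map_map, List.map_map]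
    simp [Function.comp_def]
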